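-- pv_equiv track=rewrite | github.com/ddszxhh/pubmed-rna-digest | scripts/fetch_papers.py | select_unseen
-- ===== SOURCE A (Python) =====
-- def select_unseen(papers: list[dict], seen: set[str], limit: int) -> tuple[list[dict], set[str]]:
--     selected: list[dict] = []
--     new_seen: set[str] = set()
--     for p in papers:
--         pid = p.get("id")
--         if not pid or pid in seen:
--             continue
--         selected.append(p)
--         new_seen.add(pid)
--         if len(selected) >= limit:
--             break
--     return selected, new_seen
-- ===== SOURCE B (Python) =====
-- def select_unseen(papers: list[dict], seen: set[str], limit: int) -> tuple[list[dict], set[str]]: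
--     cands = [p for p in papers if p.get("id") and p.get("id") not in seen]
--     selected = cands[:max(0, limit)]
--     new_seen = {p["id"] for p in selected}
--     return selected, new_seen
-- ===== Notes on version B (the rewrite author's own statement) =====
-- stated objective: simpler
-- what changed: Replaces the single interleaved loop (append, incremental set add, break on the post-append length check) by three plain stages: filter the unseen candidates, take the first limit of them, then build the id set from that prefix in one comprehension.
-- intended difference: For limit <= 0 when at least one unseen paper with a truthy id exists, A still returns one selected paper (it appends before its '>= limit' check), while B returns no papers and an empty set, which is the intended meaning of a non-positive limit. — e.g. on select_unseen([[("id", "a")]], [], 0): A returns ([[("id", "a")]], ["a"]), B returns ([], [])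
import Mathlib
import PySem

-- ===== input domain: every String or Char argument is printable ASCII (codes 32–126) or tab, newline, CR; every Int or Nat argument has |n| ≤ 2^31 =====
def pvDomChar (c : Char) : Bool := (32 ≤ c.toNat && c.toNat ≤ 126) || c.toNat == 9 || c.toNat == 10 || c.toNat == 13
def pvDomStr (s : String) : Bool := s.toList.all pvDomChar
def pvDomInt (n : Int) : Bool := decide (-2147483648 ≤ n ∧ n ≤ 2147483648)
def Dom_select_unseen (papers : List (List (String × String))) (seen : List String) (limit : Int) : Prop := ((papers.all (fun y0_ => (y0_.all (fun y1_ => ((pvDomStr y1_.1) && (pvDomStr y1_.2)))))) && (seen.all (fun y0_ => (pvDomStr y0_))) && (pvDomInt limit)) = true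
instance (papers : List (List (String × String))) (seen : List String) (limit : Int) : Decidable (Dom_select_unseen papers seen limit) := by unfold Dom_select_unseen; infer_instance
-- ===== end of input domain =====

-- B replaces A's interleaved loop (append / set-add / break after the length check) by
-- three stages: filter unseen candidates, take the first limit of them, build the id set
-- from that prefix; objective: simpler. For limit ≤ 0 B intentionally selects nothing
-- where A still selects one paper (stated in D_ below).

-- ===== PORT A =====
-- the loop over papers, carrying (selected, new_seen); break = returning early
def pvLoopA (seen : List String) (limit : Int) :
    List (List (String × String)) → List (List (String × String)) → PySem.Set String →
    (List (List (String × String))) × List String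
  | [], selected, newSeen => (selected, newSeen)
  | p :: rest, selected, newSeen =>
    match (PySem.Dict.mk p).get? "id" with
    | none => pvLoopA seen limit rest selected newSeen            -- pid is None: continue
    | some pid =>
      if pid = "" ∨ seen.contains pid then                        -- not pid or pid in seen
        pvLoopA seen limit rest selected newSeen
      else
        let selected' := selected ++ [p]
        let newSeen' := PySem.Set.add newSeen pid
        if limit ≤ (selected'.length : Int) then (selected', newSeen')   -- break
        else pvLoopA seen limit rest selected' newSeen'

def select_unseen (papers : List (List (String × String))) (seen : List String) (limit : Int) : (List (List (String × String))) × List String :=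
  pvLoopA seen limit papers [] PySem.Set.empty

-- ===== PORT B =====
-- p.get("id") truthy and not in seen
def pvUnseen (seen : List String) (p : List (String × String)) : Bool :=
  match (PySem.Dict.mk p).get? "id" with
  | none => false
  | some pid => pid ≠ "" && !(seen.contains pid)

def select_unseen_alt (papers : List (List (String × String))) (seen : List String) (limit : Int) : (List (List (String × String))) × List String :=
  let cands := papers.filter (pvUnseen seen)
  -- cands[:max(0, limit)]; the bound is ≥ 0, so the Python slice is a plain prefix take
  let selected := cands.take (max 0 limit).toNat
  let newSeen := PySem.Set.ofList (selected.filterMap (fun p => (PySem.Dict.mk p).get? "id"))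
  (selected, newSeen)

-- ===== PRECONDITION & SPEC =====
-- For limit ≤ 0 when some paper's first "id" entry has a nonempty value not in seen,
-- A still returns one selected paper (it appends before its '>= limit' check) while B
-- returns none; none is the intended meaning of a non-positive limit.
def D_select_unseen (papers : List (List (String × String))) (seen : List String) (limit : Int) : Prop :=
  limit ≤ 0 ∧ ∃ p ∈ papers, ((p.find? (·.1 == "id")).any fun kv => kv.2 != "" && !seen.contains kv.2) = true
instance (papers : List (List (String × String))) (seen : List String) (limit : Int) : Decidable (D_select_unseen papers seen limit) := by unfold D_select_unseen; infer_instance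

def Spec_select_unseen (papers : List (List (String × String))) (seen : List String) (limit : Int) (out : (List (List (String × String))) × List String) : Prop := ¬ D_select_unseen papers seen limit → out = select_unseen_alt papers seen limit
instance (papers : List (List (String × String))) (seen : List String) (limit : Int) (out : (List (List (String × String))) × List String) : Decidable (Spec_select_unseen papers seen limit out) := by unfold Spec_select_unseen; infer_instance

def pvDiffWitness_select_unseen : (List (List (String × String))) × List String × Int := ([[("id", "a")]], [], 0)
def pvDiffWitnessOut_select_unseen : ((List (List (String × String))) × List String) × ((List (List (String × String))) × List String) :=
  (([[("id", "a")]], ["a"]), ([], []))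

-- ===== CLAIM (what is proved, stated in full; the proofs are below) =====
def Claim_unchanged_select_unseen : Prop := ∀ (papers : List (List (String × String))) (seen : List String) (limit : Int), Dom_select_unseen papers seen limit → Spec_select_unseen papers seen limit (select_unseen papers seen limit)
def Claim_changed_select_unseen : Prop := Dom_select_unseen (pvDiffWitness_select_unseen.1) (pvDiffWitness_select_unseen.2.1) (pvDiffWitness_select_unseen.2.2) ∧ D_select_unseen (pvDiffWitness_select_unseen.1) (pvDiffWitness_select_unseen.2.1) (pvDiffWitness_select_unseen.2.2) ∧ select_unseen (pvDiffWitness_select_unseen.1) (pvDiffWitness_select_unseen.2.1) (pvDiffWitness_select_unseen.2.2) = pvDiffWitnessOut_select_unseen.1 ∧ select_unseen_alt (pvDiffWitness_select_unseen.1) (pvDiffWitness_select_unseen.2.1) (pvDiffWitness_select_unseen.2.2) = pvDiffWitnessOut_select_unseen.2 ∧ pvDiffWitnessOut_select_unseen.1 ≠ pvDiffWitnessOut_select_unseen.2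
def Claim_exact_select_unseen : Prop := ∀ (papers : List (List (String × String))) (seen : List String) (limit : Int), Dom_select_unseen papers seen limit → D_select_unseen papers seen limit → select_unseen papers seen limit ≠ select_unseen_alt papers seen limit

-- ===== LEMMAS AND PROOFS =====

-- loop invariant: while the accumulated prefix is still short of the effective cap
-- max(limit,1), the loop produces exactly the next (cap - length) filtered candidates,
-- and folds their ids into the accumulated set.
theorem pvLoopA_char (seen : List String) (limit : Int) :
    ∀ (papers selected : List (List (String × String))) (ns : PySem.Set String),
      (selected.length : Int) < max limit 1 →
      pvLoopA seen limit papers selected ns =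
        (selected ++ (papers.filter (pvUnseen seen)).take ((max limit 1).toNat - selected.length),
         (((papers.filter (pvUnseen seen)).take ((max limit 1).toNat - selected.length)).filterMap
            (fun p => (PySem.Dict.mk p).get? "id")).foldl PySem.Set.add ns) := by
  intro papers
  induction papers with
  | nil => intro selected ns _; simp [pvLoopA]
  | cons p rest ih =>
    intro selected ns hlt
    by_cases hkeep : pvUnseen seen p = true
    · -- p is kept by the filter
      obtain ⟨pid, hget, hne, hmem⟩ : ∃ pid, (PySem.Dict.mk p).get? "id" = some pid ∧
          ¬ pid = "" ∧ pid ∉ seen := by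
        unfold pvUnseen at hkeep
        cases hg : (PySem.Dict.mk p).get? "id" with
        | none => simp [hg] at hkeep
        | some pid =>
          simp [hg] at hkeep
          exact ⟨pid, rfl, hkeep.1, by simpa using hkeep.2⟩
      have htake : ((max limit 1).toNat - selected.length) =
          ((max limit 1).toNat - (selected.length + 1)) + 1 := by omega
      by_cases hstop : limit ≤ ((selected.length : Int) + 1)
      · -- break branch: the cap is reached exactly now
        have h1 : (max limit 1).toNat - selected.length = 1 := by omega
        simp [pvLoopA, hget, hne, hmem, hstop, hkeep, h1, PySem.Set.add]
      · -- continue with selected ++ [p]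
        have hlt' : (((selected ++ [p]).length : Int)) < max limit 1 := by
          simp at hstop ⊢; omega
        simp [pvLoopA, hget, hne, hmem, hstop, ih _ _ hlt', hkeep, htake,
          List.append_assoc, PySem.Set.add]
    · -- p is dropped by the filter: the loop continues with the same state
      have hdrop : ((PySem.Dict.mk p).get? "id" = none) ∨
          ∃ pid, (PySem.Dict.mk p).get? "id" = some pid ∧ (pid = "" ∨ seen.contains pid = true) := by
        unfold pvUnseen at hkeep
        cases hg : (PySem.Dict.mk p).get? "id" with
        | none => exact Or.inl rfl
        | some pid =>
          refine Or.inr ⟨pid, rfl, ?_⟩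
          simp [hg] at hkeep
          by_cases hpe : pid = ""
          · exact Or.inl hpe
          · exact Or.inr (by simpa [hpe] using hkeep hpe)
      rcases hdrop with hg | ⟨pid, hg, hc⟩
      · rw [pvLoopA, hg]; rw [ih selected ns hlt]; simp [hkeep]
      · have hc' : pid = "" ∨ pid ∈ seen := by
          rcases hc with h | h; exact Or.inl h; exact Or.inr (by simpa using h)
        rw [pvLoopA, hg]
        simp only [List.contains_eq_mem, decide_eq_true_eq, hc', if_true]
        rw [ih selected ns hlt]; simp [hkeep]

-- bridge: the positional "first id entry is truthy and unseen" condition of D_ is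
-- exactly the candidate predicate pvUnseen
theorem pvUnseen_cons (seen : List String) (kv : String × String) (rest : List (String × String)) :
    pvUnseen seen (kv :: rest) =
      if kv.1 = "id" then (kv.2 ≠ "" && !(seen.contains kv.2)) else pvUnseen seen rest := by
  obtain ⟨k, v⟩ := kv
  unfold pvUnseen
  rw [PySem.Dict.get?_mk_cons]
  by_cases h : k = "id" <;> simp [h]

theorem pvCand_iff (seen : List String) : ∀ p : List (String × String),
    ((p.find? (·.1 == "id")).any fun kv => kv.2 != "" && !seen.contains kv.2) = pvUnseen seen p := by
  intro p
  induction p with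
  | nil => simp [pvUnseen, PySem.Dict.get?]
  | cons kv rest ih =>
    rw [pvUnseen_cons]
    by_cases hk : kv.1 = "id"
    · rw [List.find?_cons_of_pos (p := (·.1 == "id")) (l := rest) (by simpa using hk), if_pos hk]
      rcases eq_or_ne kv.2 "" with h | h <;> simp [bne, h]
    · rw [List.find?_cons_of_neg (p := (·.1 == "id")) (l := rest) (by simpa using hk), if_neg hk, ih]

-- hence the non-trivial part of D_ says: the candidate filter keeps something
theorem pvCand_any (papers : List (List (String × String))) (seen : List String) :
    (∃ p ∈ papers, ((p.find? (·.1 == "id")).any fun kv => kv.2 != "" && !seen.contains kv.2) = true)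
    ↔ papers.any (pvUnseen seen) = true := by
  rw [List.any_eq_true]
  exact exists_congr fun p => by rw [pvCand_iff]

-- A as a closed form: the first max(limit,1) candidates, with their ids folded into a set
theorem select_unseen_eq (papers : List (List (String × String))) (seen : List String) (limit : Int) :
    select_unseen papers seen limit =
      (((papers.filter (pvUnseen seen)).take (max limit 1).toNat),
       ((((papers.filter (pvUnseen seen)).take (max limit 1).toNat).filterMap
          (fun p => (PySem.Dict.mk p).get? "id")).foldl PySem.Set.add PySem.Set.empty)) := by
  unfold select_unseen
  rw [pvLoopA_char seen limit papers [] PySem.Set.empty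
      (by simp only [List.length_nil, Nat.cast_zero]; omega)]
  simp

-- ===== VERDICT (by name: the statements are the Claim_ definitions above) =====
theorem select_unseen_spec : Claim_unchanged_select_unseen := by
  intro papers seen limit _ hnd
  rw [select_unseen_eq]
  unfold select_unseen_alt
  by_cases hl : 0 < limit
  · have h1 : (max limit 1).toNat = (max 0 limit).toNat := by omega
    rw [h1]
    simp [PySem.Set.ofList_eq_foldl]
  · have hnc : papers.any (pvUnseen seen) = false := by
      rw [← Bool.not_eq_true, ← pvCand_any]
      intro h
      exact hnd ⟨by omega, h⟩
    have hfil : papers.filter (pvUnseen seen) = [] := by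
      simpa [List.filter_eq_nil_iff, List.any_eq_false] using hnc
    simp [hfil, PySem.Set.ofList_eq_foldl]

theorem select_unseen_changed : Claim_changed_select_unseen := by
  unfold Claim_changed_select_unseen; decide

theorem select_unseen_tight : Claim_exact_select_unseen := by
  intro papers seen limit _ hd
  obtain ⟨hl, hc⟩ := hd
  rw [select_unseen_eq]
  unfold select_unseen_alt
  have hmax1 : (max limit 1).toNat = 1 := by omega
  have hmax0 : (max 0 limit).toNat = 0 := by omega
  have hne : papers.filter (pvUnseen seen) ≠ [] := by
    intro h
    rcases List.any_eq_true.mp ((pvCand_any papers seen).mp hc) with ⟨x, hx, hpx⟩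
    have : x ∈ papers.filter (pvUnseen seen) := List.mem_filter.mpr ⟨hx, hpx⟩
    simp [h] at this
  intro heq
  have h1 : ((papers.filter (pvUnseen seen)).take (max limit 1).toNat) =
      ((papers.filter (pvUnseen seen)).take (max 0 limit).toNat) := congrArg Prod.fst heq
  rw [hmax1, hmax0] at h1
  cases hfl : papers.filter (pvUnseen seen) with
  | nil => exact hne hfl
  | cons a l => simp [hfl] at h1
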